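-- pv_equiv track=rewrite | github.com/DINAPRASANTH/Coding-_practice | alpmul.py | alp_counter
-- ===== SOURCE A (Python) =====
-- def alp_counter(n):
--     alphabets=[]
--     numbers=[]
--     c=''
--     temp_number=''
--     for i in range(len(n)):
--         if n[i].isalpha():
--             alphabets.append(n[i])
--
--             if temp_number:
--                 numbers.append(int(temp_number))
--                 temp_number=''
--         elif n[i].isdigit():
--             temp_number+=n[i]
--
--     if temp_number:
--         numbers.append(int(temp_number))
--
--     for i in range(len(alphabets)):
--         if i<len(numbers):
--             c+=alphabets[i]*numbers[i]
--
--     return c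
-- ===== SOURCE B (Python) =====
-- def alp_counter(n):
--     # Drop separator characters once, then read letters and digit-runs off the
--     # filtered list instead of running a flag/state machine over the raw string.
--     filtered = [c for c in n if c.isalpha() or c.isdigit()]
--     letters = [c for c in filtered if c.isalpha()]
--     numbers = []
--     i, m = 0, len(filtered)
--     while i < m:
--         if filtered[i].isdigit():
--             j = i
--             while j < m and filtered[j].isdigit():
--                 j += 1
--             numbers.append(int(''.join(filtered[i:j])))
--             i = j
--         else:
--             i += 1
--     return ''.join(l * k for l, k in zip(letters, numbers))
-- ===== Notes on version B (the rewrite author's own statement) =====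
-- stated objective: alternative
-- what changed: A's single-pass flag/state machine (temp_number buffer flushed on each letter, then an index loop with an i<len(numbers) guard) is replaced by a filter-first decomposition: drop separator characters once, take the letters by a filter, read the digit runs off the filtered list with a two-pointer run scan, and combine with a truncating zip-join.
import Mathlib
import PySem

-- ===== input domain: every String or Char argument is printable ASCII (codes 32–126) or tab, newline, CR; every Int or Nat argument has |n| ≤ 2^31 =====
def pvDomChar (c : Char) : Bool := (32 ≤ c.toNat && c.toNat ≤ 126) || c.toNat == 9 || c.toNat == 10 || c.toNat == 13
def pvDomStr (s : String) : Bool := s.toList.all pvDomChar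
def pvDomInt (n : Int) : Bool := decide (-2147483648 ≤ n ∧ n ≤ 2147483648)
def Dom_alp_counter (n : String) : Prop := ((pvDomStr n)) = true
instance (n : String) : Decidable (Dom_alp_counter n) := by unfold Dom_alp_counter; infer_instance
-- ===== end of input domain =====

-- B replaces A's one-pass flag/state machine by a filter-first decomposition (drop separators,
-- then read the letters and the digit runs off the filtered list); objective: alternative, not faster.

-- ===== PORT A =====
-- state of A's first loop: (alphabets, numbers, temp_number)
def alpAStep (st : List Char × List Int × List Char) (c : Char) :
    List Char × List Int × List Char :=
  if PySem.Chars.isalpha c then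
    if st.2.2 ≠ [] then
      -- int(temp_number): temp_number is a nonempty digit string, so ofChars? is some; getD 0 is exact
      (st.1 ++ [c], st.2.1 ++ [(PySem.Int.ofChars? st.2.2).getD 0], [])
    else (st.1 ++ [c], st.2.1, st.2.2)
  else if PySem.Chars.isdigit c then (st.1, st.2.1, st.2.2 ++ [c])
  else st

def alp_counter (n : String) : String :=
  let st := n.toList.foldl alpAStep ([], [], [])
  let alphabets := st.1
  let numbers :=
    if st.2.2 ≠ [] then st.2.1 ++ [(PySem.Int.ofChars? st.2.2).getD 0] else st.2.1
  -- second loop: for i in range(len(alphabets)); i < len(alphabets), so getD is exact indexing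
  String.ofList ((List.range alphabets.length).foldl
    (fun c i => if i < numbers.length then
        c ++ PySem.List.pyRepeat [alphabets.getD i ' '] (numbers.getD i 0)
      else c) [])

-- ===== PORT B =====
-- Source B's while-loop over the filtered list: the inner `while j < m and filtered[j].isdigit()`
-- plus the slice filtered[i:j] is exactly takeWhile/dropWhile of the digit run at the front.
def alpRuns : List Char → List Int
  | [] => []
  | c :: cs =>
    if PySem.Chars.isdigit c then
      (PySem.Int.ofChars? (c :: cs.takeWhile PySem.Chars.isdigit)).getD 0
        :: alpRuns (cs.dropWhile PySem.Chars.isdigit)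
    else alpRuns cs
termination_by l => l.length
decreasing_by
  · have := List.length_dropWhile_le (p := PySem.Chars.isdigit) (l := cs)
    simp; omega
  · simp

def alp_counter_alt (n : String) : String :=
  let filtered := n.toList.filter (fun c => PySem.Chars.isalpha c || PySem.Chars.isdigit c)
  let letters := filtered.filter (fun c => PySem.Chars.isalpha c)
  let numbers := alpRuns filtered
  -- ''.join(l * k for l, k in zip(letters, numbers))
  String.ofList (((letters.zip numbers).map (fun p => PySem.List.pyRepeat [p.1] p.2)).flatten)

-- ===== PRECONDITION & SPEC =====
def Spec_alp_counter (n : String) (out : String) : Prop := out = alp_counter_alt n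
instance (n : String) (out : String) : Decidable (Spec_alp_counter n out) := by unfold Spec_alp_counter; infer_instance

-- ===== CLAIM (what is proved, stated in full; the proofs are below) =====
def Claim_equal_alp_counter : Prop := ∀ (n : String), Dom_alp_counter n → Spec_alp_counter n (alp_counter n)

-- ===== LEMMAS AND PROOFS =====

-- digits are never letters (for every Char, by the range definitions)
theorem alp_isdigit_not_isalpha (c : Char) (h : PySem.Chars.isdigit c = true) :
    PySem.Chars.isalpha c = false := by
  simp [PySem.Chars.isalpha, PySem.Chars.isupper, PySem.Chars.islower, PySem.Chars.isdigit,
    Char.le_def, UInt32.le_iff_toNat_le] at *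
  omega

-- specification of A's first loop: the number list it produces, with digit buffer t
def alpR (t : List Char) : List Char → List Int
  | [] => if t = [] then [] else [(PySem.Int.ofChars? t).getD 0]
  | c :: cs =>
    if PySem.Chars.isalpha c then
      if t = [] then alpR [] cs else (PySem.Int.ofChars? t).getD 0 :: alpR [] cs
    else if PySem.Chars.isdigit c then alpR (t ++ [c]) cs
    else alpR t cs

theorem alp_loopA (l : List Char) : ∀ (a : List Char) (ns : List Int) (t : List Char),
    (l.foldl alpAStep (a, ns, t)).1 = a ++ l.filter PySem.Chars.isalpha ∧
    (if (l.foldl alpAStep (a, ns, t)).2.2 ≠ [] then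
        (l.foldl alpAStep (a, ns, t)).2.1
          ++ [(PySem.Int.ofChars? (l.foldl alpAStep (a, ns, t)).2.2).getD 0]
      else (l.foldl alpAStep (a, ns, t)).2.1) = ns ++ alpR t l := by
  induction l with
  | nil => intro a ns t; by_cases h : t = [] <;> simp [alpR, h]
  | cons c cs ih =>
    intro a ns t
    by_cases ha : PySem.Chars.isalpha c = true
    · by_cases ht : t = []
      · simpa [alpAStep, ha, ht, alpR] using ih (a ++ [c]) ns []
      · have := ih (a ++ [c]) (ns ++ [(PySem.Int.ofChars? t).getD 0]) []
        simp [alpAStep, ha, ht, alpR] at this ⊢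
        exact ⟨this.1, this.2⟩
    · by_cases hd : PySem.Chars.isdigit c = true
      · simpa [alpAStep, ha, hd, alpR] using ih a ns (t ++ [c])
      · simpa [alpAStep, ha, hd, alpR] using ih a ns t

-- A's buffered number spec equals B's digit-run scan of the filtered list
theorem alp_R_runs (l : List Char) :
    (∀ t, t ≠ [] →
      alpR t l = (PySem.Int.ofChars? (t ++ (l.filter
          (fun c => PySem.Chars.isalpha c || PySem.Chars.isdigit c)).takeWhile
            PySem.Chars.isdigit)).getD 0
        :: alpRuns ((l.filter
          (fun c => PySem.Chars.isalpha c || PySem.Chars.isdigit c)).dropWhile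
            PySem.Chars.isdigit)) ∧
    alpR [] l = alpRuns (l.filter
        (fun c => PySem.Chars.isalpha c || PySem.Chars.isdigit c)) := by
  induction l with
  | nil => constructor <;> simp [alpR, alpRuns]
  | cons c cs ih =>
    obtain ⟨ih1, ih2⟩ := ih
    by_cases hd : PySem.Chars.isdigit c = true
    · have ha := alp_isdigit_not_isalpha c hd
      constructor
      · intro t ht
        rw [alpR]
        simp [ha, hd, ih1 (t ++ [c]) (by simp)]
      · rw [alpR]
        simp [ha, hd, ih1 [c] (by simp), alpRuns]
    · by_cases ha : PySem.Chars.isalpha c = true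
      · constructor
        · intro t ht
          rw [alpR]
          simp [ha, hd, ht, ih2, alpRuns]
        · rw [alpR]
          simp [ha, hd, ih2, alpRuns]
      · constructor
        · intro t ht
          rw [alpR]
          simp [ha, hd, ih1 t ht]
        · rw [alpR]
          simp [ha, hd, ih2]

-- filtering letters out of the alnum-filtered list = filtering letters out of the raw list
theorem alp_letters (l : List Char) :
    (l.filter (fun c => PySem.Chars.isalpha c || PySem.Chars.isdigit c)).filter
        (fun c => PySem.Chars.isalpha c)
      = l.filter PySem.Chars.isalpha := by
  rw [List.filter_filter]
  apply List.filter_congr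
  intro c _
  by_cases h : PySem.Chars.isalpha c = true <;> simp [h]

-- A's index-based combining loop = B's zip/map/flatten
theorem alp_combine (al : List Char) : ∀ (ns : List Int) (acc : List Char),
    (List.range al.length).foldl
        (fun c i => if i < ns.length then
            c ++ PySem.List.pyRepeat [al.getD i ' '] (ns.getD i 0)
          else c) acc
      = acc ++ ((al.zip ns).map (fun p => PySem.List.pyRepeat [p.1] p.2)).flatten := by
  induction al with
  | nil => intro ns acc; simp
  | cons a al ih =>
    intro ns acc
    rw [List.length_cons, List.range_succ_eq_map, List.foldl_cons, List.foldl_map]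
    cases ns with
    | nil =>
      simp only [List.length_nil, Nat.not_lt_zero, if_false]
      rw [show (fun (c : List Char) (i : ℕ) => c) = (fun c _ => c) from rfl]
      simp [List.foldl_fixed]
    | cons k ns =>
      simp only [List.length_cons, Nat.zero_lt_succ, if_true, List.getD_cons_zero, List.getD_cons_succ, Nat.succ_lt_succ_iff]
      rw [ih ns (acc ++ PySem.List.pyRepeat [a] k)]
      simp [List.zip_cons_cons]

-- ===== VERDICT (by name: the statement is the Claim_ definition above) =====
theorem alp_counter_spec : Claim_equal_alp_counter := by
  intro n _
  unfold Spec_alp_counter alp_counter alp_counter_alt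
  dsimp only
  have h1 := alp_loopA n.toList [] [] []
  rw [h1.1, List.nil_append, alp_combine, List.nil_append]
  have h2 : (if (n.toList.foldl alpAStep ([], [], [])).2.2 ≠ [] then
      (n.toList.foldl alpAStep ([], [], [])).2.1
        ++ [(PySem.Int.ofChars? (n.toList.foldl alpAStep ([], [], [])).2.2).getD 0]
    else (n.toList.foldl alpAStep ([], [], [])).2.1)
      = alpRuns (n.toList.filter
          (fun c => PySem.Chars.isalpha c || PySem.Chars.isdigit c)) := by
    rw [h1.2, List.nil_append, (alp_R_runs n.toList).2]
  rw [h2, alp_letters]
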